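-- pv_equiv track=rewrite | github.com/yangDM9378/Algorithm_Solving | 프로그래머스/3/152995. 인사고과/인사고과.py | solution
-- ===== SOURCE A (Python) =====
-- def solution(scores):
--     answer = 1
--     wanho_at,wanho_ex = scores[0]
--     scores.sort(key=lambda x:(-x[0],x[1]))
--     pass_num = 0
--     for score in scores:
--         check_at, check_ex = score
--         if wanho_at < check_at and wanho_ex < check_ex:
--             return -1
--
--         if pass_num <= check_ex:
--             if wanho_at+wanho_ex < check_at+check_ex:
--                 answer+=1
--             pass_num = check_ex
--     return answer
-- ===== SOURCE B (Python) =====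
-- def solution(scores):
--     at0, ex0 = scores[0]
--     if any(a > at0 and e > ex0 for a, e in scores):
--         return -1
--     wsum = at0 + ex0
--     rank = 1
--     for a, e in scores:
--         if a + e > wsum and not any(x > a and y > e for x, y in scores):
--             rank += 1
--     return rank
-- ===== Notes on version B (the rewrite author's own statement) =====
-- stated objective: alternative
-- what changed: A sorts by (-at, ex) and runs a fused greedy sweep with a running max (pass_num); B never sorts: it uses the order-free characterisation 'an employee survives iff no one strictly beats them in both scores' and counts, by a quadratic brute-force dominance test, the surviving employees whose sum exceeds wanho's.
-- intended difference: On inputs where wanho is not dominated but some undominated employee with a NEGATIVE second score has a larger sum, A's pass_num starts at 0 and wrongly drops that employee (returning a rank too low), while B counts every undominated higher-sum employee, which is the intended rank (A's 0-initialisation silently assumes non-negative scores). — e.g. on solution([[0, 0], [5, -1]]): A returns 1, B returns 2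
import Mathlib
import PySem

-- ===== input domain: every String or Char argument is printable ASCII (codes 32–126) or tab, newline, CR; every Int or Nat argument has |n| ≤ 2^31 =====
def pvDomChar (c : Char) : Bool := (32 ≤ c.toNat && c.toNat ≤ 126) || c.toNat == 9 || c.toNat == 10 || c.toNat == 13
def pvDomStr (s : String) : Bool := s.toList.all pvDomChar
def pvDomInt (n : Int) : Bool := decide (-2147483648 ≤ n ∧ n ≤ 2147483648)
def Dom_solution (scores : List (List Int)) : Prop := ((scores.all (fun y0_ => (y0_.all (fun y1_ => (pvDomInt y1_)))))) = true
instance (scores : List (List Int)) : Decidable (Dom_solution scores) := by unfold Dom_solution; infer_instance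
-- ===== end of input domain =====

-- B replaces A's sort-and-sweep with a sort-free quadratic count of employees not strictly
-- dominated in both scores; A sorts its argument in place, so the equivalence is about the
-- return value only. On inputs with a negative second score A's 0-initialised running max can
-- drop an undominated employee (see D_solution); B returns the intended rank there.


-- ===== PORT A =====
-- A's fused loop over the sorted list: state (answer, pass_num), early return -1.
def solutionLoop (wa we : Int) (answer passn : Int) : List (List Int) → Int
  | [] => answer
  | s :: rest =>
    let ca := PySem.List.pyGetD s 0 0
    let ce := PySem.List.pyGetD s 1 0
    if wa < ca ∧ we < ce then -1
    else if passn ≤ ce then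
      solutionLoop wa we (if wa + we < ca + ce then answer + 1 else answer) ce rest
    else
      solutionLoop wa we answer passn rest

def solution (scores : List (List Int)) : Int :=
  let w := PySem.List.pyGetD scores 0 []
  let wa := PySem.List.pyGetD w 0 0
  let we := PySem.List.pyGetD w 1 0
  let sorted := PySem.List.sorted2 scores (fun x => -(PySem.List.pyGetD x 0 0)) (fun x => PySem.List.pyGetD x 1 0)
  solutionLoop wa we 1 0 sorted

-- ===== PORT B =====
-- Source B's 'any(x > a and y > e for x, y in scores)': someone strictly beats (a, e) in both.
def altDominated (scores : List (List Int)) (a e : Int) : Bool :=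
  scores.any (fun q => decide (a < PySem.List.pyGetD q 0 0) && decide (e < PySem.List.pyGetD q 1 0))

-- Source B's counting loop with the rank accumulator.
def altLoop (scores : List (List Int)) (wsum : Int) (rank : Int) : List (List Int) → Int
  | [] => rank
  | s :: rest =>
    let a := PySem.List.pyGetD s 0 0
    let e := PySem.List.pyGetD s 1 0
    if wsum < a + e ∧ altDominated scores a e = false then
      altLoop scores wsum (rank + 1) rest
    else
      altLoop scores wsum rank rest

def solution_alt (scores : List (List Int)) : Int :=
  let w := PySem.List.pyGetD scores 0 []
  let at0 := PySem.List.pyGetD w 0 0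
  let ex0 := PySem.List.pyGetD w 1 0
  if altDominated scores at0 ex0 then -1
  else altLoop scores (at0 + ex0) 1 scores

-- ===== PRECONDITION & SPEC =====
-- A raises (IndexError / unpacking ValueError) on an empty list or on a row whose length is not 2.
def Pre_solution (scores : List (List Int)) : Prop :=
  scores ≠ [] ∧ ∀ r ∈ scores, r.length = 2
instance (scores : List (List Int)) : Decidable (Pre_solution scores) := by unfold Pre_solution; infer_instance

def pvWitness_solution : List (List Int) := [[2, 2], [1, 4], [3, 2], [3, 2], [2, 1]]

-- row projections and 'nobody strictly beats r in both scores' (input conditions only)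
abbrev gA (r : List Int) : Int := PySem.List.pyGetD r 0 0
abbrev gE (r : List Int) : Int := PySem.List.pyGetD r 1 0
abbrev pvUndom (sc : List (List Int)) (r : List Int) : Prop :=
  ∀ q ∈ sc, ¬(gA r < gA q ∧ gE r < gE q)

-- On inputs where wanho is not dominated but some undominated employee with a negative second
-- score has a larger sum, A's 0-initialised pass_num wrongly drops that employee and returns a
-- rank too low; B counts every undominated higher-sum employee, the intended rank.
def D_solution (scores : List (List Int)) : Prop :=
  let w := PySem.List.pyGetD scores 0 []
  pvUndom scores w ∧ ∃ r ∈ scores, gE r < 0 ∧ gA w + gE w < gA r + gE r ∧ pvUndom scores r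
instance (scores : List (List Int)) : Decidable (D_solution scores) := by unfold D_solution; infer_instance

def Spec_solution (scores : List (List Int)) (out : Int) : Prop := ¬ D_solution scores → out = solution_alt scores
instance (scores : List (List Int)) (out : Int) : Decidable (Spec_solution scores out) := by unfold Spec_solution; infer_instance

def pvDiffWitness_solution : List (List Int) := [[0, 0], [5, -1]]
def pvDiffWitnessOut_solution : Int × Int := (1, 2)

-- ===== CLAIM =====
def Claim_unchanged_solution : Prop := ∀ (scores : List (List Int)), Dom_solution scores → Pre_solution scores → Spec_solution scores (solution scores)
def Claim_changed_solution : Prop := Dom_solution (pvDiffWitness_solution) ∧ Pre_solution (pvDiffWitness_solution) ∧ D_solution (pvDiffWitness_solution) ∧ solution (pvDiffWitness_solution) = pvDiffWitnessOut_solution.1 ∧ solution_alt (pvDiffWitness_solution) = pvDiffWitnessOut_solution.2 ∧ pvDiffWitnessOut_solution.1 ≠ pvDiffWitnessOut_solution.2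
def Claim_exact_solution : Prop := ∀ (scores : List (List Int)), Dom_solution scores → Pre_solution scores → D_solution scores → solution scores ≠ solution_alt scores

-- ===== LEMMAS AND PROOFS =====

-- the Bool order sorted2 inserts by, specialised to A's key (-at, ex)
def ltb (x y : List Int) : Bool :=
  decide ((-(gA x) : Int) < -(gA y)) || (!decide ((-(gA y) : Int) < -(gA x)) && decide (gE x < gE y))

lemma sorted2_eq (xs : List (List Int)) :
    PySem.List.sorted2 xs (fun x => -(PySem.List.pyGetD x 0 0)) (fun x => PySem.List.pyGetD x 1 0)
      = xs.foldl (fun acc x => PySem.List.insertBy ltb x acc) [] := rfl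

lemma ltb_eq_true_iff (x y : List Int) :
    ltb x y = true ↔ (gA y < gA x ∨ (gA y ≤ gA x ∧ gE x < gE y)) := by
  simp only [ltb, Bool.or_eq_true, Bool.and_eq_true, Bool.not_eq_true', decide_eq_true_eq,
    decide_eq_false_iff_not]
  omega

lemma ltb_eq_false_iff (x y : List Int) :
    ltb y x = false ↔ gA y ≤ gA x ∧ (gA y < gA x ∨ gE x ≤ gE y) := by
  rw [Bool.eq_false_iff, Ne, ltb_eq_true_iff]
  omega

lemma ltb_trans (a b c : List Int) (h1 : ltb a b = true) (h2 : ltb b c = true) : ltb a c = true := by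
  rw [ltb_eq_true_iff] at *
  omega

lemma ltb_asymm (a b : List Int) (h : ltb a b = true) : ltb b a = false := by
  rw [ltb_eq_true_iff] at h
  rw [ltb_eq_false_iff]
  omega

lemma pairwise_insertBy (x : List Int) (l : List (List Int))
    (h : l.Pairwise (fun a b => ltb b a = false)) :
    (PySem.List.insertBy ltb x l).Pairwise (fun a b => ltb b a = false) := by
  induction l with
  | nil => simp [PySem.List.insertBy]
  | cons y ys ih =>
    rw [List.pairwise_cons] at h
    by_cases hxy : ltb x y = true
    · rw [show PySem.List.insertBy ltb x (y :: ys) = x :: y :: ys by simp [PySem.List.insertBy, hxy]]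
      refine List.Pairwise.cons ?_ (List.Pairwise.cons h.1 h.2)
      intro z hz
      rcases List.mem_cons.mp hz with rfl | hz
      · exact ltb_asymm x z hxy
      · rw [Bool.eq_false_iff, Ne]
        intro hzx
        have := ltb_trans z x y hzx hxy
        rw [h.1 z hz] at this
        exact Bool.false_ne_true this
    · have hxy' : ltb x y = false := Bool.eq_false_iff.mpr hxy
      rw [show PySem.List.insertBy ltb x (y :: ys) = y :: PySem.List.insertBy ltb x ys by
        simp [PySem.List.insertBy, hxy']]
      refine List.Pairwise.cons ?_ (ih h.2)
      intro z hz
      rcases (PySem.List.mem_insertBy ltb x z ys).mp hz with rfl | hz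
      · exact hxy'
      · exact h.1 z hz

lemma pairwise_foldl_insertBy (xs acc : List (List Int))
    (h : acc.Pairwise (fun a b => ltb b a = false)) :
    (xs.foldl (fun acc x => PySem.List.insertBy ltb x acc) acc).Pairwise (fun a b => ltb b a = false) := by
  induction xs generalizing acc with
  | nil => exact h
  | cons x xs ih => exact ih _ (pairwise_insertBy x acc h)

lemma altDominated_eq_false_iff (scores : List (List Int)) (a e : Int) :
    altDominated scores a e = false ↔
      ∀ q ∈ scores, ¬(a < gA q ∧ e < gE q) := by
  simp [altDominated, gA, gE]

-- If some element of the list dominates wanho, A's loop returns -1.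
lemma solutionLoop_dom (wa we ans pn : Int) (l : List (List Int))
    (h : ∃ r ∈ l, wa < PySem.List.pyGetD r 0 0 ∧ we < PySem.List.pyGetD r 1 0) :
    solutionLoop wa we ans pn l = -1 := by
  induction l generalizing ans pn with
  | nil => simp at h
  | cons s rest ih =>
    simp only [solutionLoop]
    rcases h with ⟨r, hr, hd⟩
    rcases List.mem_cons.mp hr with rfl | hr
    · rw [if_pos hd]
    · split_ifs with h1 h2 <;> first | rfl | exact ih _ _ ⟨r, hr, hd⟩

-- B's loop is an accumulator for the length of a filter.
lemma altLoop_count (scores : List (List Int)) (w rank : Int) (l : List (List Int)) :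
    altLoop scores w rank l =
      rank + ((l.filter (fun s => decide (w < gA s + gE s) && !altDominated scores (gA s) (gE s))).length : Int) := by
  induction l generalizing rank with
  | nil => simp [altLoop]
  | cons s rest ih =>
    simp only [altLoop, List.filter_cons]
    by_cases h1 : w < gA s + gE s
    · by_cases h2 : altDominated scores (gA s) (gE s) = false
      · rw [if_pos ⟨h1, h2⟩, ih, if_pos (by simp [h1, h2])]
        push_cast [List.length_cons]
        ring
      · have h2' : altDominated scores (gA s) (gE s) = true := by simpa using h2
        rw [if_neg (fun hc => h2 hc.2), ih, if_neg (by simp [h2'])]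
    · rw [if_neg (fun hc => h1 hc.1), ih, if_neg (by simp [h1])]

-- The heart: on a sorted tail l with processed prefix p, A's kept test 'pass_num ≤ ex'
-- holds exactly when '0 ≤ ex and nobody in scores strictly dominates the element'.
lemma solutionLoop_count (wa we : Int) (scores : List (List Int))
    (hw : ∀ r ∈ scores, ¬(wa < gA r ∧ we < gE r)) :
    ∀ (l p : List (List Int)) (ans pn : Int),
      (p ++ l).Perm scores →
      (p ++ l).Pairwise (fun a b => ltb b a = false) →
      0 ≤ pn →
      (∀ x ∈ p, gE x ≤ pn) →
      (pn = 0 ∨ ∃ x ∈ p, gE x = pn) →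
      solutionLoop wa we ans pn l =
        ans + ((l.filter (fun s =>
          decide (wa + we < gA s + gE s) && decide (0 ≤ gE s) && !altDominated scores (gA s) (gE s))).length : Int) := by
  intro l
  induction l with
  | nil => intro p ans pn _ _ _ _ _; simp [solutionLoop]
  | cons s rest ih =>
    intro p ans pn hperm hpair hpn hup hwit
    have hsmem : s ∈ scores := hperm.mem_iff.mp (by simp)
    have hnd : ¬(wa < gA s ∧ we < gE s) := hw s hsmem
    have hiff : pn ≤ gE s ↔ (0 ≤ gE s ∧ altDominated scores (gA s) (gE s) = false) := by
      constructor
      · intro hle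
        refine ⟨le_trans hpn hle, ?_⟩
        rw [altDominated_eq_false_iff]
        intro q hq hqd
        have hq' : q ∈ p ++ s :: rest := hperm.mem_iff.mpr hq
        rcases List.mem_append.mp hq' with hqp | hqs
        · have h1 := hup q hqp
          have h2 := hqd.2
          omega
        · rcases List.mem_cons.mp hqs with rfl | hqr
          · exact absurd hqd.1 (lt_irrefl _)
          · have hR : ltb q s = false :=
              List.rel_of_pairwise_cons (List.pairwise_append.mp hpair).2.1 hqr
            have h3 := (ltb_eq_false_iff s q).mp hR
            have h4 := hqd.1
            omega
      · rintro ⟨hge0, hdomf⟩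
        by_contra hlt
        rcases hwit with h0 | ⟨x, hx, hxe⟩
        · omega
        · have hxs : gE s < gE x := by omega
          have hR : ltb s x = false :=
            (List.pairwise_append.mp hpair).2.2 x hx s (by simp)
          have hfi := (ltb_eq_false_iff x s).mp hR
          have hgax : gA s < gA x := by omega
          have hxmem : x ∈ scores := hperm.mem_iff.mp (List.mem_append.mpr (Or.inl hx))
          rw [altDominated_eq_false_iff] at hdomf
          exact hdomf x hxmem ⟨hgax, hxs⟩
    have heq : p ++ s :: rest = (p ++ [s]) ++ rest := by simp
    rw [heq] at hperm hpair
    simp only [solutionLoop, if_neg hnd]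
    by_cases hkeep : pn ≤ gE s
    · rw [if_pos hkeep]
      have hks := hiff.mp hkeep
      rw [ih (p ++ [s]) _ (gE s) hperm hpair hks.1
        (by intro x hx
            rcases List.mem_append.mp hx with hx | hx
            · exact le_trans (hup x hx) hkeep
            · simp at hx; subst hx; exact le_rfl)
        (Or.inr ⟨s, by simp, rfl⟩)]
      simp only [List.filter_cons]
      by_cases hsum : wa + we < gA s + gE s
      · rw [if_pos hsum, if_pos (by simp [hsum, hks.1, hks.2])]
        push_cast [List.length_cons]
        ring
      · rw [if_neg hsum, if_neg (by simp [hsum])]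
    · rw [if_neg hkeep]
      rw [ih (p ++ [s]) _ pn hperm hpair hpn
        (by intro x hx
            rcases List.mem_append.mp hx with hx | hx
            · exact hup x hx
            · simp at hx; subst hx; omega)
        (by rcases hwit with h0 | ⟨x, hx, hxe⟩
            · exact Or.inl h0
            · exact Or.inr ⟨x, List.mem_append.mpr (Or.inl hx), hxe⟩)]
      simp only [List.filter_cons]
      rw [if_neg (by
        simp only [Bool.and_eq_true, decide_eq_true_eq, Bool.not_eq_true']
        intro hc
        exact hkeep (hiff.mpr ⟨hc.1.2, hc.2⟩))]

-- strictly fewer elements pass a strictly stronger filter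
lemma length_filter_lt {α : Type} (p q : α → Bool) (l : List α)
    (himp : ∀ a ∈ l, p a = true → q a = true)
    (r : α) (hr : r ∈ l) (hq : q r = true) (hp : p r = false) :
    (l.filter p).length < (l.filter q).length := by
  rw [← List.countP_eq_length_filter, ← List.countP_eq_length_filter]
  induction l with
  | nil => simp at hr
  | cons x xs ih =>
    rw [List.countP_cons, List.countP_cons]
    rcases List.mem_cons.mp hr with rfl | hr
    · have hmono : xs.countP p ≤ xs.countP q :=
        List.countP_mono_left (fun a ha => himp a (List.mem_cons_of_mem _ ha))
      simp [hp, hq]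
      omega
    · have hx : p x = true → q x = true := himp x (by simp)
      have htail := ih (fun a ha => himp a (List.mem_cons_of_mem _ ha)) hr
      by_cases hpx : p x = true
      · rw [if_pos hpx, if_pos (hx hpx)]; omega
      · rw [if_neg hpx]
        split_ifs <;> omega

-- A with no dominator of wanho: 1 + count over scores of (higher sum, ex ≥ 0, undominated).
lemma solution_eq_count (scores : List (List Int)) (wa we : Int)
    (hwa : wa = PySem.List.pyGetD (PySem.List.pyGetD scores 0 []) 0 0)
    (hwe : we = PySem.List.pyGetD (PySem.List.pyGetD scores 0 []) 1 0)
    (hw : ∀ r ∈ scores, ¬(wa < gA r ∧ we < gE r)) :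
    solution scores =
      1 + ((scores.filter (fun s =>
        decide (wa + we < gA s + gE s) && decide (0 ≤ gE s) && !altDominated scores (gA s) (gE s))).length : Int) := by
  have hperm : (PySem.List.sorted2 scores (fun x => -(PySem.List.pyGetD x 0 0)) (fun x => PySem.List.pyGetD x 1 0)).Perm scores :=
    PySem.List.sorted2_perm ..
  have hpair : (PySem.List.sorted2 scores (fun x => -(PySem.List.pyGetD x 0 0)) (fun x => PySem.List.pyGetD x 1 0)).Pairwise
      (fun a b => ltb b a = false) := by
    rw [sorted2_eq]; exact pairwise_foldl_insertBy scores [] (by simp)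
  unfold solution
  simp only []
  rw [← hwa, ← hwe]
  rw [solutionLoop_count wa we scores hw _ [] 1 0 (by simpa using hperm) (by simpa using hpair)
    le_rfl (by simp) (Or.inl rfl)]
  rw [(hperm.filter _).length_eq]

-- ===== VERDICT =====
theorem solution_spec : Claim_unchanged_solution := by
  intro scores _ _
  unfold Spec_solution
  intro hD
  unfold solution_alt
  simp only []
  by_cases hdom : altDominated scores (PySem.List.pyGetD (PySem.List.pyGetD scores 0 []) 0 0)
      (PySem.List.pyGetD (PySem.List.pyGetD scores 0 []) 1 0) = true
  · rw [if_pos hdom]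
    rcases List.any_eq_true.mp hdom with ⟨q, hq, hqd⟩
    simp only [Bool.and_eq_true, decide_eq_true_eq] at hqd
    unfold solution
    simp only []
    exact solutionLoop_dom _ _ 1 0 _
      ⟨q, (PySem.List.sorted2_perm ..).mem_iff.mpr hq, hqd⟩
  · have hdom' := Bool.eq_false_iff.mpr hdom
    rw [if_neg hdom]
    have hw := (altDominated_eq_false_iff ..).mp hdom'
    rw [altLoop_count, solution_eq_count scores _ _ rfl rfl hw]
    congr 2
    refine congrArg List.length (List.filter_congr ?_)
    intro r hr
    by_cases hsum : PySem.List.pyGetD (PySem.List.pyGetD scores 0 []) 0 0 + PySem.List.pyGetD (PySem.List.pyGetD scores 0 []) 1 0 < gA r + gE r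
    · by_cases hrd : altDominated scores (gA r) (gE r) = false
      · have hge : (0:Int) ≤ gE r := by
          by_contra hneg
          have hneg' : gE r < 0 := by omega
          exact hD ⟨fun q hq hc => hdom (List.any_eq_true.mpr ⟨q, hq, by simp [hc.1, hc.2]⟩),
            r, hr, hneg', hsum, (altDominated_eq_false_iff ..).mp hrd⟩
        simp [hsum, hge, hrd]
      · have h2' : altDominated scores (gA r) (gE r) = true := by simpa using hrd
        simp [h2']
    · simp [hsum]

theorem solution_changed : Claim_changed_solution := by unfold Claim_changed_solution; decide

theorem solution_tight : Claim_exact_solution := by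
  intro scores _ _ hD
  obtain ⟨hC1, r, hr, hneg, hsum, hundom⟩ := hD
  have hw : ∀ q ∈ scores, ¬(PySem.List.pyGetD (PySem.List.pyGetD scores 0 []) 0 0 < gA q ∧
      PySem.List.pyGetD (PySem.List.pyGetD scores 0 []) 1 0 < gE q) := hC1
  have hdomf : altDominated scores (PySem.List.pyGetD (PySem.List.pyGetD scores 0 []) 0 0)
      (PySem.List.pyGetD (PySem.List.pyGetD scores 0 []) 1 0) = false :=
    (altDominated_eq_false_iff ..).mpr hw
  rw [solution_eq_count scores _ _ rfl rfl hw]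
  unfold solution_alt
  simp only []
  rw [if_neg (Bool.eq_false_iff.mp hdomf), altLoop_count]
  have hstrict := length_filter_lt
    (fun s => decide (PySem.List.pyGetD (PySem.List.pyGetD scores 0 []) 0 0 + PySem.List.pyGetD (PySem.List.pyGetD scores 0 []) 1 0 < gA s + gE s) && decide (0 ≤ gE s) && !altDominated scores (gA s) (gE s))
    (fun s => decide (PySem.List.pyGetD (PySem.List.pyGetD scores 0 []) 0 0 + PySem.List.pyGetD (PySem.List.pyGetD scores 0 []) 1 0 < gA s + gE s) && !altDominated scores (gA s) (gE s))
    scores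
    (by intro a _ h
        simp only [Bool.and_eq_true] at h ⊢
        exact ⟨h.1.1, h.2⟩)
    r hr
    (by have hh := (altDominated_eq_false_iff scores (gA r) (gE r)).mpr hundom
        simp [hsum, hh])
    (by have hlt : ¬ ((0:Int) ≤ gE r) := by omega
        simp [hlt])
  intro hcontra
  omega
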